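-- pv_equiv track=rewrite | github.com/earino/resumasher | tests/test_tailor_combined_projects_live.py | _projects_section_h3s
-- ===== SOURCE A (Python) =====
-- def _projects_section_h3s(markdown: str) -> list[str]:
--     """Return only the H3 headings that fall under the `## Projects`
--     section — that's where the combined-projects bug manifests."""
--     in_projects = False
--     out: list[str] = []
--     for line in markdown.splitlines():
--         if line.startswith("## "):
--             in_projects = line.strip().lower() == "## projects"
--             continue
--         if in_projects and line.startswith("### "):
--             out.append(line[4:].rstrip())
--     return out
-- ===== SOURCE B (Python) =====
-- def _projects_section_h3s(markdown: str) -> list[str]: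
--     # Two-phase: partition lines into (header, body) sections, then harvest
--     # H3 lines from every '## projects' section.
--     sections = []
--     header = None
--     body = []
--     for line in markdown.splitlines():
--         if line.startswith("## "):
--             if header is not None:
--                 sections.append((header, body))
--             header = line
--             body = []
--         elif header is not None:
--             body.append(line)
--     if header is not None:
--         sections.append((header, body))
--     out: list[str] = []
--     for header, body in sections:
--         if header.strip().lower() == "## projects":
--             out.extend(line[4:].rstrip() for line in body if line.startswith("### "))
--     return out
-- ===== Notes on version B (the rewrite author's own statement) =====
-- stated objective: alternative
-- what changed: Replaced the single stateful flag-scan with a two-phase decomposition: first group the lines into (header, body) sections, then in a separate pass harvest the H3 lines from every '## projects' section.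
import Mathlib
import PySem

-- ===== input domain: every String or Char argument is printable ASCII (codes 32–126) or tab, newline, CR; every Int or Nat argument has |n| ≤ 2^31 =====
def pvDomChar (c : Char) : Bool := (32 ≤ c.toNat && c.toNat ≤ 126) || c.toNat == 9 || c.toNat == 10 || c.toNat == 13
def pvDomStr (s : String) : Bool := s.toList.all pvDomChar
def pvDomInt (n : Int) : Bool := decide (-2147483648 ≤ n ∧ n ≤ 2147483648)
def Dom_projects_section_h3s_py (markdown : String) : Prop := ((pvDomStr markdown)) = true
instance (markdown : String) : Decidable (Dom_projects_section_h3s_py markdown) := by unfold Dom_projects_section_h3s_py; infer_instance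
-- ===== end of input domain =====

-- B changes the decomposition: it first groups the lines into (header, body)
-- sections, then harvests the H3 lines from every '## projects' section in a
-- second pass (objective: alternative; same cost).

-- ===== PORT A =====
def pvStepA (st : Bool × List String) (line : String) : Bool × List String :=
  if PySem.Str.startswith line "## " then
    (PySem.Str.lower (PySem.Str.strip line) == "## projects", st.2)
  else if st.1 && PySem.Str.startswith line "### " then
    (st.1, st.2 ++ [PySem.Str.rstrip (PySem.Str.slice line (some 4) none)])
  else st

def projects_section_h3s_py (markdown : String) : List String :=
  ((PySem.Str.splitlines markdown).foldl pvStepA (false, [])).2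

-- ===== PORT B =====
def pvIsProj (h : String) : Bool := PySem.Str.lower (PySem.Str.strip h) == "## projects"
def pvIsH3 (l : String) : Bool := PySem.Str.startswith l "### "
def pvConv (l : String) : String := PySem.Str.rstrip (PySem.Str.slice l (some 4) none)

-- phase 1: grouping lines into sections (body accumulated once a header is seen)
def pvCollect : List String → String → List String → List (String × List String)
  | [], h, b => [(h, b)]
  | l :: ls, h, b =>
    if PySem.Str.startswith l "## " then (h, b) :: pvCollect ls l []
    else pvCollect ls h (b ++ [l])

def pvSections : List String → List (String × List String)
  | [] => []
  | l :: ls =>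
    if PySem.Str.startswith l "## " then pvCollect ls l []
    else pvSections ls

-- phase 2: harvest H3 lines of the '## projects' sections
def pvEmit (h : String) (b : List String) : List String :=
  if pvIsProj h then (b.filter pvIsH3).map pvConv else []

def projects_section_h3s_py_alt (markdown : String) : List String :=
  (pvSections (PySem.Str.splitlines markdown)).flatMap (fun s => pvEmit s.1 s.2)

-- ===== PRECONDITION & SPEC =====
def Pre_projects_section_h3s_py (markdown : String) : Prop := True
-- A returns normally on every string (it only scans lines), so Pre_ is
-- trivially true; the witness below shows a typical "## projects" document.
instance (markdown : String) : Decidable (Pre_projects_section_h3s_py markdown) := by unfold Pre_projects_section_h3s_py; infer_instance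
def pvWitness_projects_section_h3s_py : String := "## Projects\n### Alpha One\n### Beta\n## Other\n### Gamma\n## projects\n### Delta "

def Spec_projects_section_h3s_py (markdown : String) (out : List String) : Prop := out = projects_section_h3s_py_alt markdown
instance (markdown : String) (out : List String) : Decidable (Spec_projects_section_h3s_py markdown out) := by unfold Spec_projects_section_h3s_py; infer_instance

-- ===== CLAIM (what is proved, stated in full; the proofs are below) =====
def Claim_equal_projects_section_h3s_py : Prop := ∀ (markdown : String), Dom_projects_section_h3s_py markdown → Pre_projects_section_h3s_py markdown → Spec_projects_section_h3s_py markdown (projects_section_h3s_py markdown)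

-- ===== LEMMAS AND PROOFS =====
lemma pvEmit_nil (h : String) : pvEmit h [] = [] := by
  simp [pvEmit]

lemma pvEmit_append_h3 (h : String) (b : List String) (l : String)
    (hp : pvIsProj h = true) (h3 : pvIsH3 l = true) :
    pvEmit h (b ++ [l]) = pvEmit h b ++ [pvConv l] := by
  simp [pvEmit, hp, h3]

lemma pvEmit_append_not_h3 (h : String) (b : List String) (l : String)
    (h3 : pvIsH3 l = false) :
    pvEmit h (b ++ [l]) = pvEmit h b := by
  simp [pvEmit, h3]

lemma pvEmit_not_proj (h : String) (b : List String) (hp : pvIsProj h = false) :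
    pvEmit h b = [] := by
  simp [pvEmit, hp]

lemma foldA_collect (ls : List String) :
    ∀ (h : String) (b out : List String),
      (ls.foldl pvStepA (pvIsProj h, out ++ pvEmit h b)).2
        = out ++ (pvCollect ls h b).flatMap (fun s => pvEmit s.1 s.2) := by
  induction ls with
  | nil => intro h b out; simp [pvCollect]
  | cons l ls ih =>
    intro h b out
    by_cases hh : PySem.Chars.startswith l.toList ['#', '#', ' '] = true
    · have step : pvStepA (pvIsProj h, out ++ pvEmit h b) l
          = (pvIsProj l, out ++ pvEmit h b) := by
        simp [pvStepA, pvIsProj, hh]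
      have ihl := ih l [] (out ++ pvEmit h b)
      simp only [List.foldl, step]
      rw [show out ++ pvEmit h b = (out ++ pvEmit h b) ++ pvEmit l [] by
            rw [pvEmit_nil, List.append_nil], ihl]
      simp [pvCollect, hh, List.append_assoc]
    · have hh' : PySem.Chars.startswith l.toList ['#', '#', ' '] = false := by
        simpa using hh
      by_cases hp : pvIsProj h = true
      · have hp2 : PySem.Str.lower (PySem.Str.strip h) = "## projects" := by
          simpa [pvIsProj] using hp
        by_cases h3 : PySem.Chars.startswith l.toList ['#', '#', '#', ' '] = true
        · have h3' : pvIsH3 l = true := by simp [pvIsH3, h3]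
          have step : pvStepA (pvIsProj h, out ++ pvEmit h b) l
              = (pvIsProj h, out ++ pvEmit h (b ++ [l])) := by
            simp [pvStepA, pvIsProj, hh', hp2, h3, pvConv,
                  pvEmit_append_h3 h b l hp h3']
          simp only [List.foldl, step, ih h (b ++ [l]) out]
          simp [pvCollect, hh']
        · have h3f : PySem.Chars.startswith l.toList ['#', '#', '#', ' '] = false := by
            simpa using h3
          have h3' : pvIsH3 l = false := by simp [pvIsH3, h3f]
          have step : pvStepA (pvIsProj h, out ++ pvEmit h b) l
              = (pvIsProj h, out ++ pvEmit h (b ++ [l])) := by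
            simp [pvStepA, hh', h3f, pvEmit_append_not_h3 h b l h3']
          simp only [List.foldl, step, ih h (b ++ [l]) out]
          simp [pvCollect, hh']
      · have hp' : pvIsProj h = false := by simpa using hp
        have hp2 : ¬ PySem.Str.lower (PySem.Str.strip h) = "## projects" := by
          simpa [pvIsProj] using hp
        have step : pvStepA (pvIsProj h, out ++ pvEmit h b) l
            = (pvIsProj h, out ++ pvEmit h (b ++ [l])) := by
          simp [pvStepA, pvIsProj, hh', hp2, pvEmit_not_proj h _ hp']
        simp only [List.foldl, step, ih h (b ++ [l]) out]
        simp [pvCollect, hh']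

lemma foldA_sections (ls : List String) :
    ∀ out, (ls.foldl pvStepA (false, out)).2
      = out ++ (pvSections ls).flatMap (fun s => pvEmit s.1 s.2) := by
  induction ls with
  | nil => intro out; simp [pvSections]
  | cons l ls ih =>
    intro out
    by_cases hh : PySem.Chars.startswith l.toList ['#', '#', ' '] = true
    · have step : pvStepA (false, out) l = (pvIsProj l, out) := by
        simp [pvStepA, pvIsProj, hh]
      have hc := foldA_collect ls l [] out
      simp only [List.foldl, step]
      rw [show out = out ++ pvEmit l [] by rw [pvEmit_nil, List.append_nil], hc]
      simp [pvSections, hh, pvEmit_nil]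
    · have hh' : PySem.Chars.startswith l.toList ['#', '#', ' '] = false := by
        simpa using hh
      have step : pvStepA (false, out) l = (false, out) := by
        simp [pvStepA, hh']
      simp only [List.foldl, step, ih out]
      simp [pvSections, hh']

-- ===== VERDICT (by name: the statement is the Claim_ definition above) =====
theorem projects_section_h3s_py_spec : Claim_equal_projects_section_h3s_py := by
  intro markdown hdom hpre
  unfold Spec_projects_section_h3s_py projects_section_h3s_py projects_section_h3s_py_alt
  simpa using foldA_sections (PySem.Str.splitlines markdown) []
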